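-- pv_equiv track=rewrite | github.com/wmcknig/Advent-of-Code-2020 | day24.py | hex_traverse
-- ===== SOURCE A (Python) =====
-- def hex_traverse(path):
--     #start at initial space
--     space = (0, 0, 0) #STUB
--     for step in path:
--         if step == "e":
--             space = (space[0] + 1, space[1] + 1, space[2])
--         elif step == "w":
--             space = (space[0] - 1, space[1] - 1, space[2])
--         elif step == "ne":
--             space = (space[0], space[1] + 1, space[2] + 1)
--         elif step == "nw":
--             space = (space[0] - 1, space[1], space[2] + 1)
--         elif step == "se":
--             space = (space[0] + 1, space[1], space[2] - 1)
--         elif step == "sw":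
--             space = (space[0], space[1] - 1, space[2] - 1)
--         #invalid step, ignore
--         else:
--             continue
--         #if it's in the set, remove it, else add it
--     return space
-- ===== SOURCE B (Python) =====
-- def hex_traverse(path):
--     # tally-then-closed-form: count each direction once, combine counts linearly
--     e = path.count("e")
--     w = path.count("w")
--     ne = path.count("ne")
--     nw = path.count("nw")
--     se = path.count("se")
--     sw = path.count("sw")
--     return (e - w - nw + se, e - w + ne - sw, ne + nw - se - sw)
-- ===== Notes on version B (the rewrite author's own statement) =====
-- stated objective: simpler
-- what changed: Replaces the sequential per-step accumulation loop by tallying each of the six direction strings once and computing the coordinates as three closed-form linear expressions over the counts.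
import Mathlib
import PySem

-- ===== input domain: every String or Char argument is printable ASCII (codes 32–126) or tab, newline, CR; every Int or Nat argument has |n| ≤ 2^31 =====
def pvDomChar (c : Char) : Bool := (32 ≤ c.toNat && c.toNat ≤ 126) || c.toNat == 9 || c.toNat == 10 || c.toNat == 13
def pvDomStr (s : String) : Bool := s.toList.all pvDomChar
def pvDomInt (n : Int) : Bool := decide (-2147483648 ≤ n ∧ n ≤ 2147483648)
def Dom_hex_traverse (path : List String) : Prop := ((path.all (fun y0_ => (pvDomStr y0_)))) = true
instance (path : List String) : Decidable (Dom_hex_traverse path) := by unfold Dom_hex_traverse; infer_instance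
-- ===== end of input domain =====

-- B replaces A's per-step accumulation loop by counting each direction once and combining
-- the six tallies into three closed-form linear expressions (objective: simpler).

-- ===== PORT A =====
def hex_traverse (path : List String) : Int × Int × Int :=
  path.foldl (fun space step =>
    if step == "e" then (space.1 + 1, space.2.1 + 1, space.2.2)
    else if step == "w" then (space.1 - 1, space.2.1 - 1, space.2.2)
    else if step == "ne" then (space.1, space.2.1 + 1, space.2.2 + 1)
    else if step == "nw" then (space.1 - 1, space.2.1, space.2.2 + 1)
    else if step == "se" then (space.1 + 1, space.2.1, space.2.2 - 1)
    else if step == "sw" then (space.1, space.2.1 - 1, space.2.2 - 1)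
    else space) (0, 0, 0)

-- ===== PORT B =====
def hex_traverse_alt (path : List String) : Int × Int × Int :=
  let e : Int := PySem.List.count path "e"
  let w : Int := PySem.List.count path "w"
  let ne : Int := PySem.List.count path "ne"
  let nw : Int := PySem.List.count path "nw"
  let se : Int := PySem.List.count path "se"
  let sw : Int := PySem.List.count path "sw"
  (e - w - nw + se, e - w + ne - sw, ne + nw - se - sw)

-- ===== PRECONDITION & SPEC =====
def Spec_hex_traverse (path : List String) (out : Int × Int × Int) : Prop := out = hex_traverse_alt path
instance (path : List String) (out : Int × Int × Int) : Decidable (Spec_hex_traverse path out) := by unfold Spec_hex_traverse; infer_instance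

-- ===== CLAIM (what is proved, stated in full; the proofs are below) =====
def Claim_equal_hex_traverse : Prop := ∀ (path : List String), Dom_hex_traverse path → Spec_hex_traverse path (hex_traverse path)

-- ===== LEMMAS AND PROOFS =====
-- loop invariant: A's fold from any start point adds the count-based closed form
theorem hex_traverse_foldl_eq (path : List String) (s : Int × Int × Int) :
    path.foldl (fun space step =>
      if step == "e" then (space.1 + 1, space.2.1 + 1, space.2.2)
      else if step == "w" then (space.1 - 1, space.2.1 - 1, space.2.2)
      else if step == "ne" then (space.1, space.2.1 + 1, space.2.2 + 1)
      else if step == "nw" then (space.1 - 1, space.2.1, space.2.2 + 1)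
      else if step == "se" then (space.1 + 1, space.2.1, space.2.2 - 1)
      else if step == "sw" then (space.1, space.2.1 - 1, space.2.2 - 1)
      else space) s
    = (s.1 + (path.count "e" : Int) - path.count "w" - path.count "nw" + path.count "se",
       s.2.1 + (path.count "e" : Int) - path.count "w" + path.count "ne" - path.count "sw",
       s.2.2 + (path.count "ne" : Int) + path.count "nw" - path.count "se" - path.count "sw") := by
  induction path generalizing s with
  | nil => simp
  | cons hd tl ih =>
    rw [List.foldl_cons, ih]
    obtain ⟨a, b, c⟩ := s
    simp only [List.count_cons]
    by_cases h1 : hd = "e"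
    · subst h1; simp; try omega
    by_cases h2 : hd = "w"
    · subst h2; simp; try omega
    by_cases h3 : hd = "ne"
    · subst h3; simp; try omega
    by_cases h4 : hd = "nw"
    · subst h4; simp; try omega
    by_cases h5 : hd = "se"
    · subst h5; simp; try omega
    by_cases h6 : hd = "sw"
    · subst h6; simp; try omega
    simp [h1, h2, h3, h4, h5, h6]

-- ===== VERDICT (by name: the statement is the Claim_ definition above) =====
theorem hex_traverse_spec : Claim_equal_hex_traverse := by
  intro path _
  unfold Spec_hex_traverse hex_traverse hex_traverse_alt
  rw [hex_traverse_foldl_eq]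
  simp [PySem.List.count_eq]
  try omega
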